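-- pv_equiv track=rewrite | github.com/nalalalan/alan-operator-site | backend/app/services/text_cleanup.py | _compress_open_questions
-- ===== SOURCE A (Python) =====
-- def _bullet_priority(line: str) -> int:
--     lowered = line.lower()
--     if "primary contact" in lowered or "decision-maker" in lowered or "decision maker" in lowered:
--         return 100
--     if "budget" in lowered:
--         return 90
--     if "scope" in lowered:
--         return 80
--     if "timeline" in lowered or "deadline" in lowered:
--         return 70
--     if "follow-up" in lowered or "next step" in lowered:
--         return 40
--     return 10
--
-- def _compress_open_questions(lines: list[str], start_index: int, max_bullets: int) -> tuple[list[str], int]: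
--     output = [lines[start_index]]
--     i = start_index + 1
--     bullets = []
--     while i < len(lines) and lines[i].strip().startswith("- "):
--         bullets.append(lines[i])
--         i += 1
--
--     indexed = list(enumerate(bullets))
--     indexed.sort(key=lambda pair: (-_bullet_priority(pair[1]), pair[0]))
--     keep = indexed[:max_bullets]
--     keep.sort(key=lambda pair: pair[0])
--
--     output.extend([bullet for _, bullet in keep])
--     return output, i
-- ===== SOURCE B (Python) =====
-- def _bullet_priority(line: str) -> int:
--     lowered = line.lower()
--     if "primary contact" in lowered or "decision-maker" in lowered or "decision maker" in lowered:
--         return 100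
--     if "budget" in lowered:
--         return 90
--     if "scope" in lowered:
--         return 80
--     if "timeline" in lowered or "deadline" in lowered:
--         return 70
--     if "follow-up" in lowered or "next step" in lowered:
--         return 40
--     return 10
--
-- def _compress_open_questions(lines: list[str], start_index: int, max_bullets: int) -> tuple[list[str], int]:
--     output = [lines[start_index]]
--     i = start_index + 1
--     bullets = []
--     while i < len(lines) and lines[i].strip().startswith("- "):
--         bullets.append(lines[i])
--         i += 1
--
--     # counting-sort selection: no comparison sort at all — walk the six possible
--     # priority values from highest to lowest, bucketing bullet indices, then keep
--     # the first max_bullets indices and emit the bullets in one forward pass.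
--     order = []
--     for p in (100, 90, 80, 70, 40, 10):
--         for j, b in enumerate(bullets):
--             if _bullet_priority(b) == p:
--                 order.append(j)
--     kept = set(order[:max_bullets])
--     for j, b in enumerate(bullets):
--         if j in kept:
--             output.append(b)
--     return output, i
-- ===== Notes on version B (the rewrite author's own statement) =====
-- stated objective: alternative
-- what changed: Replaces A's two comparison sorts (stable sort of (index,bullet) pairs by (-priority,index), slice, then re-sort by index) with a counting-sort selection: bucket bullet indices by the six possible priority values from highest to lowest, keep the first max_bullets indices as a set, and emit the kept bullets in one forward pass, so no comparison sort and no second sort is needed.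
import Mathlib
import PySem

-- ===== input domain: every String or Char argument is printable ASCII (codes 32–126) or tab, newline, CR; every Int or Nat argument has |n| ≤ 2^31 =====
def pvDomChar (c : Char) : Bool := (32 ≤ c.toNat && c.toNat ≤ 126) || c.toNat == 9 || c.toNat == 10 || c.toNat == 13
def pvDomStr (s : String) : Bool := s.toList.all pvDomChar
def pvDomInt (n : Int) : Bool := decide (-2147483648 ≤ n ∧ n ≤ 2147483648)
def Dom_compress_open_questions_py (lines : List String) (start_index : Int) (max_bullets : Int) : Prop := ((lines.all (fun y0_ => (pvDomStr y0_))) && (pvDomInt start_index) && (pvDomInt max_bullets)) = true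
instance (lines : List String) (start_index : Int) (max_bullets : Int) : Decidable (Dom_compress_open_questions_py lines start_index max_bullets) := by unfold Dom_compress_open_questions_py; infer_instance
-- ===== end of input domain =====

-- B replaces A's two comparison sorts by a counting-sort bucket selection over the six possible
-- priority values plus one forward filtering pass (objective: alternative algorithm, same results).

-- ===== PORT A =====

-- helper _bullet_priority (shared by the two Pythons verbatim; both ports call it)
def bullet_priority_py (line : String) : Int :=
  let lowered := PySem.Str.lower line
  if PySem.Str.isIn "primary contact" lowered || PySem.Str.isIn "decision-maker" lowered
      || PySem.Str.isIn "decision maker" lowered then 100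
  else if PySem.Str.isIn "budget" lowered then 90
  else if PySem.Str.isIn "scope" lowered then 80
  else if PySem.Str.isIn "timeline" lowered || PySem.Str.isIn "deadline" lowered then 70
  else if PySem.Str.isIn "follow-up" lowered || PySem.Str.isIn "next step" lowered then 40
  else 10

-- the bullet-gathering while loop (identical source lines in A and in B, hence one shared helper):
-- while i < len(lines) and lines[i].strip().startswith("- "): bullets.append(lines[i]); i += 1
-- (indices stay in range: i only grows from start_index+1, so pyGetD's default is never used under Pre_)
def pvScanBullets (lines : List String) (i : Int) : List String × Int :=
  if h : i < PySem.List.len lines ∧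
      PySem.Str.startswith (PySem.Str.strip (PySem.List.pyGetD lines i "")) "- " = true then
    let r := pvScanBullets lines (i + 1)
    (PySem.List.pyGetD lines i "" :: r.1, r.2)
  else ([], i)
termination_by (PySem.List.len lines - i).toNat
decreasing_by simp only [PySem.List.len_eq] at h ⊢; omega

def compress_open_questions_py (lines : List String) (start_index : Int) (max_bullets : Int) :
    List String × Int :=
  let output := [PySem.List.pyGetD lines start_index ""]
  let scan := pvScanBullets lines (start_index + 1)
  let bullets := scan.1
  let i := scan.2
  let indexed := PySem.List.enumerate bullets
  let indexed2 := PySem.List.sorted2 indexed (fun p => -(bullet_priority_py p.2)) (fun p => p.1)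
  let keep := PySem.List.slice indexed2 none (some max_bullets)
  let keep2 := PySem.List.sorted keep (fun p => p.1)
  (output ++ keep2.map (fun p => p.2), i)

-- ===== PORT B =====

def compress_open_questions_py_alt (lines : List String) (start_index : Int) (max_bullets : Int) :
    List String × Int :=
  let output := [PySem.List.pyGetD lines start_index ""]
  let scan := pvScanBullets lines (start_index + 1)
  let bullets := scan.1
  let i := scan.2
  -- for p in (100, 90, 80, 70, 40, 10): for j, b in enumerate(bullets): if prio(b) == p: order.append(j)
  let order := ([100, 90, 80, 70, 40, 10] : List Int).foldl
    (fun acc p => (PySem.List.enumerate bullets).foldl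
      (fun acc2 q => if bullet_priority_py q.2 == p then acc2 ++ [q.1] else acc2) acc) []
  let kept : PySem.Set Int := PySem.Set.ofList (PySem.List.slice order none (some max_bullets))
  -- for j, b in enumerate(bullets): if j in kept: output.append(b)
  let final := (PySem.List.enumerate bullets).foldl
    (fun acc q => if PySem.Set.contains kept q.1 then acc ++ [q.2] else acc) output
  (final, i)

-- ===== PRECONDITION & SPEC =====
-- Pre_ = exactly where Python A returns: lines[start_index] must not raise IndexError
-- (this is PySem.Raise.InRange lines.length start_index, written out).
def Pre_compress_open_questions_py (lines : List String) (start_index : Int) (max_bullets : Int) : Prop :=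
  -(lines.length : Int) ≤ start_index ∧ start_index < (lines.length : Int)
instance (lines : List String) (start_index : Int) (max_bullets : Int) : Decidable (Pre_compress_open_questions_py lines start_index max_bullets) := by unfold Pre_compress_open_questions_py; infer_instance

def pvWitness_compress_open_questions_py : List String × Int × Int :=
  (["Open questions:", "- budget?", "- misc"], 0, 1)

def Spec_compress_open_questions_py (lines : List String) (start_index : Int) (max_bullets : Int) (out : List String × Int) : Prop := out = compress_open_questions_py_alt lines start_index max_bullets
instance (lines : List String) (start_index : Int) (max_bullets : Int) (out : List String × Int) : Decidable (Spec_compress_open_questions_py lines start_index max_bullets out) := by unfold Spec_compress_open_questions_py; infer_instance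

-- ===== CLAIM (what is proved, stated in full; the proofs are below) =====
def Claim_equal_compress_open_questions_py : Prop := ∀ (lines : List String) (start_index : Int) (max_bullets : Int), Dom_compress_open_questions_py lines start_index max_bullets → Pre_compress_open_questions_py lines start_index max_bullets → Spec_compress_open_questions_py lines start_index max_bullets (compress_open_questions_py lines start_index max_bullets)

-- ===== LEMMAS AND PROOFS =====

-- the six values _bullet_priority can return
theorem pv_prio_mem (s : String) : bullet_priority_py s ∈ ([100, 90, 80, 70, 40, 10] : List Int) := by
  unfold bullet_priority_py
  dsimp only
  split_ifs <;> simp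

-- the bucket concatenation B builds, as (index, bullet) pairs
def pvOrdPairs (bullets : List String) : List (Int × String) :=
  ([100, 90, 80, 70, 40, 10] : List Int).flatMap
    (fun p => (PySem.List.enumerate bullets).filter (fun q => bullet_priority_py q.2 == p))

-- A's sort key (-priority, index) as a lexicographic value
def pvKey (q : Int × String) : Lex (Int × Int) := toLex (-(bullet_priority_py q.2), q.1)

theorem pv_flatMap_skip {α : Type} (x : α) (p0 : Int) (ps : List Int) (g : Int → List α)
    (h : p0 ∉ ps) :
    ps.flatMap (fun p => (if p0 == p then [x] else []) ++ g p) = ps.flatMap g := by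
  induction ps with
  | nil => simp
  | cons p ps ih =>
    have h1 : p0 ≠ p := fun e => h (by simp [e])
    have h2 : p0 ∉ ps := fun m => h (by simp [m])
    simp only [List.flatMap_cons, ih h2]
    simp [h1]

theorem pv_bucket_insert_perm {α : Type} (x : α) (p0 : Int) (ps : List Int) (g : Int → List α)
    (hn : ps.Nodup) (hp : p0 ∈ ps) :
    (ps.flatMap (fun p => (if p0 == p then [x] else []) ++ g p)).Perm (x :: ps.flatMap g) := by
  induction ps with
  | nil => cases hp
  | cons p ps ih =>
    rcases List.nodup_cons.mp hn with ⟨hpn, hn'⟩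
    rcases List.mem_cons.mp hp with he | hm
    · subst he
      rw [List.flatMap_cons, pv_flatMap_skip x p0 ps g hpn]
      simp
    · have hne : p0 ≠ p := fun e => hpn (e ▸ hm)
      have ih' := ih hn' hm
      simp only [List.flatMap_cons]
      have hif : (if (p0 == p) = true then [x] else []) = ([] : List α) := by simp [hne]
      rw [hif, List.nil_append]
      exact (ih'.append_left (g p)).trans List.perm_middle

theorem pv_buckets_perm (ps : List Int) (hn : ps.Nodup) (l : List (Int × String))
    (hl : ∀ a ∈ l, bullet_priority_py a.2 ∈ ps) :
    (ps.flatMap (fun p => l.filter (fun q => bullet_priority_py q.2 == p))).Perm l := by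
  induction l with
  | nil => simp
  | cons a l ih =>
    have hcons : (fun p => (a :: l).filter (fun q => bullet_priority_py q.2 == p)) =
        (fun p => (if bullet_priority_py a.2 == p then [a] else []) ++
          l.filter (fun q => bullet_priority_py q.2 == p)) := by
      funext p
      by_cases h : bullet_priority_py a.2 = p <;> simp [h]
    rw [hcons]
    exact (pv_bucket_insert_perm a (bullet_priority_py a.2) ps
        (fun p => l.filter (fun q => bullet_priority_py q.2 == p)) hn (hl a (by simp))).trans
      ((ih (fun b hb => hl b (by simp [hb]))).cons a)

theorem pv_ordPairs_perm (bullets : List String) :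
    (pvOrdPairs bullets).Perm (PySem.List.enumerate bullets) := by
  exact pv_buckets_perm ([100, 90, 80, 70, 40, 10] : List Int) (by decide)
    (PySem.List.enumerate bullets) (fun a _ => pv_prio_mem a.2)

theorem pv_enumerate_nodup (bullets : List String) : (PySem.List.enumerate bullets).Nodup := by
  refine (PySem.List.pairwise_lt_enumerate bullets 0).imp ?_
  intro a b h e
  rw [e] at h
  exact lt_irrefl _ h

theorem pv_enumerate_fst_inj (bullets : List String) {q r : Int × String}
    (hq : q ∈ PySem.List.enumerate bullets) (hr : r ∈ PySem.List.enumerate bullets)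
    (h : q.1 = r.1) : q = r := by
  rcases (PySem.List.mem_enumerate_iff bullets 0 q).mp hq with ⟨k, hk, rfl⟩
  rcases (PySem.List.mem_enumerate_iff bullets 0 r).mp hr with ⟨k', hk', rfl⟩
  simp only at h
  have : k = k' := by omega
  subst this
  rfl

theorem pv_buckets_pairwise (bullets : List String) (ps : List Int)
    (h : ps.Pairwise (fun a b => b < a)) :
    (ps.flatMap (fun p => (PySem.List.enumerate bullets).filter
      (fun q => bullet_priority_py q.2 == p))).Pairwise (fun a b => pvKey a < pvKey b) := by
  induction ps with
  | nil => simp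
  | cons p ps ih =>
    rw [List.pairwise_cons] at h
    rw [List.flatMap_cons]
    refine List.pairwise_append.mpr ⟨?_, ih h.2, ?_⟩
    · refine ((PySem.List.pairwise_lt_enumerate bullets 0).filter _).imp_of_mem ?_
      intro a b ha hb hlt
      have hpa : bullet_priority_py a.2 = p := by
        have := List.of_mem_filter ha; simpa using this
      have hpb : bullet_priority_py b.2 = p := by
        have := List.of_mem_filter hb; simpa using this
      simp only [pvKey, Prod.Lex.toLex_lt_toLex]
      right
      exact ⟨by rw [hpa, hpb], hlt⟩
    · intro a ha b hb
      have hpa : bullet_priority_py a.2 = p := by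
        have := List.of_mem_filter ha; simpa using this
      rcases List.mem_flatMap.mp hb with ⟨p', hp', hbf⟩
      have hpb : bullet_priority_py b.2 = p' := by
        have := List.of_mem_filter hbf; simpa using this
      have : p' < p := h.1 p' hp'
      simp only [pvKey, Prod.Lex.toLex_lt_toLex]
      left
      rw [hpa, hpb]
      omega

theorem pv_ordPairs_pairwise (bullets : List String) :
    (pvOrdPairs bullets).Pairwise (fun a b => pvKey a < pvKey b) :=
  pv_buckets_pairwise bullets ([100, 90, 80, 70, 40, 10] : List Int) (by decide)

theorem pv_sorted2_eq_sorted_lex {α : Type} (xs : List α) (k1 k2 : α → Int) :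
    PySem.List.sorted2 xs k1 k2 false = PySem.List.sorted xs (fun a => toLex (k1 a, k2 a)) false := by
  unfold PySem.List.sorted2 PySem.List.sorted
  dsimp only
  have hb : (fun a b => decide (k1 a < k1 b) || (!decide (k1 b < k1 a) && decide (k2 a < k2 b))) =
      (fun a b => decide ((toLex (k1 a, k2 a) : Lex (Int × Int)) < toLex (k1 b, k2 b))) := by
    funext a b
    rcases lt_trichotomy (k1 a) (k1 b) with h | h | h
    · simp [h, Prod.Lex.toLex_lt_toLex]
    · simp [h, Prod.Lex.toLex_lt_toLex]
    · simp [h, lt_asymm h, ne_of_gt h, Prod.Lex.toLex_lt_toLex]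
  simp only [Bool.false_eq_true, if_false]
  rw [hb]

theorem pv_sorted2_enumerate (bullets : List String) :
    PySem.List.sorted2 (PySem.List.enumerate bullets)
      (fun p => -(bullet_priority_py p.2)) (fun p => p.1) = pvOrdPairs bullets := by
  rw [pv_sorted2_eq_sorted_lex]
  refine PySem.List.sorted_eq_of_perm_of_pairwise_lt _ (pvOrdPairs bullets) _
    (pv_ordPairs_perm bullets) ?_
  exact (pv_ordPairs_pairwise bullets).imp (fun h => h)

theorem pv_slice_to_take {α : Type} (xs : List α) (b : Int) :
    PySem.List.slice xs none (some b) = xs.take (PySem.List.clampIdx xs.length b) := by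
  simp [PySem.List.slice]

-- the heart: A's "slice then re-sort by index" equals B's "filter by membership of the index"
theorem pv_select_eq (bullets : List String) (t : Nat)
    (K : List (Int × String)) (hK : K = (pvOrdPairs bullets).take t) :
    PySem.List.sorted K (fun p => p.1) false =
      (PySem.List.enumerate bullets).filter
        (fun q => PySem.Set.contains (PySem.Set.ofList (K.map (fun p => p.1))) q.1) := by
  have hEnd : (PySem.List.enumerate bullets).Nodup := pv_enumerate_nodup bullets
  have hOnd : (pvOrdPairs bullets).Nodup := ((pv_ordPairs_perm bullets).nodup_iff).mpr hEnd
  have hKnd : K.Nodup := hK ▸ (List.take_sublist t _).nodup hOnd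
  have hKE : ∀ r ∈ K, r ∈ PySem.List.enumerate bullets := by
    intro r hr
    exact (pv_ordPairs_perm bullets).mem_iff.mp (List.mem_of_mem_take (hK ▸ hr))
  set F := (PySem.List.enumerate bullets).filter
      (fun q => PySem.Set.contains (PySem.Set.ofList (K.map (fun p => p.1))) q.1) with hF
  have hFnd : F.Nodup := hEnd.filter _
  have hmem : ∀ q, q ∈ F ↔ q ∈ K := by
    intro q
    rw [hF, List.mem_filter]
    constructor
    · rintro ⟨hqE, hc⟩
      have : q.1 ∈ K.map (fun p => p.1) :=
        (PySem.Set.mem_ofList _ _).mp ((PySem.Set.contains_iff _ _).mp hc)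
      rcases List.mem_map.mp this with ⟨r, hrK, hr1⟩
      have : q = r := pv_enumerate_fst_inj bullets hqE (hKE r hrK) hr1.symm
      exact this ▸ hrK
    · intro hqK
      refine ⟨hKE q hqK, ?_⟩
      exact (PySem.Set.contains_iff _ _).mpr
        ((PySem.Set.mem_ofList _ _).mpr (List.mem_map_of_mem hqK))
  have hperm : F.Perm K := (List.perm_ext_iff_of_nodup hFnd hKnd).mpr hmem
  have hpair : F.Pairwise (fun a b => a.1 < b.1) :=
    (PySem.List.pairwise_lt_enumerate bullets 0).filter _
  exact PySem.List.sorted_eq_of_perm_of_pairwise_lt K F _ hperm hpair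

-- ===== VERDICT (by name: the statement is the Claim_ definition above) =====
theorem compress_open_questions_py_spec : Claim_equal_compress_open_questions_py := by
  intro lines start_index max_bullets _ _
  unfold Spec_compress_open_questions_py compress_open_questions_py compress_open_questions_py_alt
  dsimp only
  rw [pv_sorted2_enumerate, pv_slice_to_take]
  have hinner : ∀ (acc : List Int) (p : Int),
      (PySem.List.enumerate (pvScanBullets lines (start_index + 1)).1).foldl
        (fun acc2 q => if bullet_priority_py q.2 == p then acc2 ++ [q.1] else acc2) acc
        = acc ++ ((PySem.List.enumerate (pvScanBullets lines (start_index + 1)).1).filter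
            (fun q => bullet_priority_py q.2 == p)).map (fun q => q.1) :=
    fun acc p => PySem.List.foldl_append_if _ _ _ _
  simp only [hinner]
  rw [PySem.List.foldl_append_eq_flatMap]
  have hop : ([100, 90, 80, 70, 40, 10] : List Int).flatMap
      (fun p => ((PySem.List.enumerate (pvScanBullets lines (start_index + 1)).1).filter
        (fun q => bullet_priority_py q.2 == p)).map (fun q => q.1))
      = (pvOrdPairs (pvScanBullets lines (start_index + 1)).1).map (fun q => q.1) := by
    unfold pvOrdPairs
    exact List.map_flatMap.symm
  simp only [List.nil_append, hop, pv_slice_to_take, List.length_map, ← List.map_take]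
  have hfin : ∀ (S : PySem.Set Int) (acc : List String),
      (PySem.List.enumerate (pvScanBullets lines (start_index + 1)).1).foldl
        (fun acc q => if S.contains q.1 = true then acc ++ [q.2] else acc) acc
      = acc ++ ((PySem.List.enumerate (pvScanBullets lines (start_index + 1)).1).filter
          (fun q => S.contains q.1)).map (fun q => q.2) :=
    fun S acc => PySem.List.foldl_append_if _ _ _ _
  rw [hfin]
  rw [← pv_select_eq (pvScanBullets lines (start_index + 1)).1
    (PySem.List.clampIdx (pvOrdPairs (pvScanBullets lines (start_index + 1)).1).length max_bullets)
    _ rfl]
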